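-- pv_equiv track=rewrite | github.com/MikoNix/Fragmos | modules/contextualizer/sequencer.py | _extract_header_section
-- ===== SOURCE A (Python) =====
-- def _extract_header_section(context_md: str) -> str:
--     """Извлечь только ## Header секцию из context.md."""
--     parts = []
--     in_header = False
--     for line in context_md.splitlines():
--         if line.startswith("## Header"):
--             in_header = True
--             parts.append(line)
--             continue
--         if in_header:
--             if line.startswith("## ") and not line.startswith("## Header"):
--                 break
--             parts.append(line)
--     return "\n".join(parts)
-- ===== SOURCE B (Python) =====
-- def _extract_header_section(context_md: str) -> str:
--     """Two-phase: locate the first '## Header' line, then slice up to the next section."""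
--     lines = context_md.splitlines()
--     start = next((i for i, line in enumerate(lines) if line.startswith("## Header")), None)
--     if start is None:
--         return ""
--     rest = lines[start + 1:]
--     end = next((j for j, line in enumerate(rest)
--                 if line.startswith("## ") and not line.startswith("## Header")),
--                len(rest))
--     return "\n".join(lines[start:start + 1 + end])
-- ===== Notes on version B (the rewrite author's own statement) =====
-- stated objective: alternative
-- what changed: Replaced A's single flag-driven loop with mutable in_header state by a two-phase decomposition: find the index of the first header-marker line, find the index of the next section break after it, then slice and join.
import Mathlib
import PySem

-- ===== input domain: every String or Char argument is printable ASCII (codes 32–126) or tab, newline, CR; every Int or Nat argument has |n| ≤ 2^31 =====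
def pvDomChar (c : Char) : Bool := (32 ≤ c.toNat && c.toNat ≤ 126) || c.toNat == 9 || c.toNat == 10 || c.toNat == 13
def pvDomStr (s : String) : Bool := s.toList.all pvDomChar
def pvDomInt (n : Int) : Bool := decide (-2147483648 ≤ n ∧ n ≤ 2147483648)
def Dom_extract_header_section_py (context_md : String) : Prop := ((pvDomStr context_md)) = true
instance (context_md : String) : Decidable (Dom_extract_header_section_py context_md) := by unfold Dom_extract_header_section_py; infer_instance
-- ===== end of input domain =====

-- B replaces A's single flag-driven pass with a two-phase decomposition (find the start index of
-- the header section, find the end index, slice and join); objective: alternative structure, same O(n) cost.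

-- ===== PORT A =====
-- the for-loop with `break`/`continue` over splitlines, state (parts, in_header)
def aLoop : List String → List String → Bool → List String
  | [], parts, _ => parts
  | line :: rest, parts, in_header =>
    if PySem.Str.startswith line "## Header" then
      aLoop rest (parts ++ [line]) true
    else if in_header then
      if PySem.Str.startswith line "## " && !PySem.Str.startswith line "## Header" then
        parts
      else
        aLoop rest (parts ++ [line]) in_header
    else
      aLoop rest parts in_header

def extract_header_section_py (context_md : String) : String :=
  PySem.Str.join "\n" (aLoop (PySem.Str.splitlines context_md) [] false)

-- ===== PORT B =====
-- next((i for i, line in enumerate(...) if ...), default) is ported as List.find? over PySem.List.enumerate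
def extract_header_section_py_alt (context_md : String) : String :=
  let lines := PySem.Str.splitlines context_md
  match (PySem.List.enumerate lines).find? (fun il => PySem.Str.startswith il.2 "## Header") with
  | none => ""
  | some (start, _) =>
    let rest := PySem.List.slice lines (some (start + 1)) none
    let endIdx :=
      match (PySem.List.enumerate rest).find?
          (fun jl => PySem.Str.startswith jl.2 "## " && !PySem.Str.startswith jl.2 "## Header") with
      | some (j, _) => j
      | none => (rest.length : Int)
    PySem.Str.join "\n" (PySem.List.slice lines (some start) (some (start + 1 + endIdx)))

-- ===== PRECONDITION & SPEC =====
def Spec_extract_header_section_py (context_md : String) (out : String) : Prop := out = extract_header_section_py_alt context_md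
instance (context_md : String) (out : String) : Decidable (Spec_extract_header_section_py context_md out) := by unfold Spec_extract_header_section_py; infer_instance

-- ===== CLAIM (what is proved, stated in full; the proofs are below) =====
def Claim_equal_extract_header_section_py : Prop := ∀ (context_md : String), Dom_extract_header_section_py context_md → Spec_extract_header_section_py context_md (extract_header_section_py context_md)

-- ===== LEMMAS AND PROOFS =====

-- abbreviations for the two line predicates (definitionally what both ports test)
def isHdr (l : String) : Bool := PySem.Str.startswith l "## Header"
def isSec (l : String) : Bool := PySem.Str.startswith l "## " && !PySem.Str.startswith l "## Header"

-- general: taking exactly the takeWhile-length is takeWhile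
lemma take_takeWhile_length {α : Type} (q : α → Bool) :
    ∀ (t : List α), t.take (t.takeWhile q).length = t.takeWhile q := by
  intro t
  induction t with
  | nil => rfl
  | cons x xs ih =>
    by_cases h : q x = true
    · simp [h, ih]
    · simp [h]

-- general: dropping the takeWhile-length is dropWhile
lemma drop_takeWhile_length {α : Type} (q : α → Bool) :
    ∀ (t : List α), t.drop (t.takeWhile q).length = t.dropWhile q := by
  intro t
  induction t with
  | nil => rfl
  | cons x xs ih =>
    by_cases h : q x = true
    · simp [h, ih]
    · simp [h]

-- find? over enumerate, characterised by takeWhile/dropWhile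
lemma find?_enumerate (p : String → Bool) :
    ∀ (xs : List String) (s : Int),
      ((PySem.List.enumerate xs s).find? (fun il => p il.2))
        = (match xs.dropWhile (fun l => !p l) with
           | [] => none
           | h :: _ => some (s + ((xs.takeWhile (fun l => !p l)).length : Int), h)) := by
  intro xs
  induction xs with
  | nil => intro s; rfl
  | cons x rest ih =>
    intro s
    by_cases h : p x = true
    · simp [PySem.List.enumerate_cons, h]
    · have h' : p x = false := by simpa using h
      simp only [PySem.List.enumerate_cons, List.find?_cons, h', List.dropWhile_cons,
        List.takeWhile_cons, Bool.not_false, if_true]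
      rw [ih (s + 1)]
      cases hd : rest.dropWhile (fun l => !p l) with
      | nil => simp
      | cons y t =>
        simp only [List.length_cons, Option.some.injEq, Prod.mk.injEq, and_true]
        push_cast; ring

-- the in-header phase of A collects takeWhile (not a section break)
lemma aLoop_true :
    ∀ (xs parts : List String), aLoop xs parts true = parts ++ xs.takeWhile (fun l => !isSec l) := by
  intro xs
  induction xs with
  | nil => intro parts; simp [aLoop]
  | cons x rest ih =>
    intro parts
    by_cases hp : PySem.Str.startswith x "## Header" = true
    · have hsec : (!isSec x) = true := by unfold isSec; rw [hp]; simp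
      simp only [aLoop, hp, if_true, List.takeWhile_cons, hsec]
      rw [ih]
      simp
    · have hp' : PySem.Str.startswith x "## Header" = false := by simpa using hp
      by_cases hs : PySem.Str.startswith x "## " = true
      · have hsec : (!isSec x) = false := by unfold isSec; rw [hp', hs]; rfl
        simp only [aLoop, hp', Bool.not_false, Bool.and_true, hs, if_true, Bool.false_eq_true,
          if_false, List.takeWhile_cons, hsec]
        simp
      · have hs' : PySem.Str.startswith x "## " = false := by simpa using hs
        have hsec : (!isSec x) = true := by unfold isSec; rw [hs']; rfl
        simp only [aLoop, hp', hs', Bool.false_and, Bool.false_eq_true, if_false, if_true,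
          List.takeWhile_cons, hsec]
        rw [ih]
        simp

-- the search phase of A, characterised by dropWhile/takeWhile
lemma aLoop_false :
    ∀ (xs parts : List String),
      aLoop xs parts false
        = parts ++ (match xs.dropWhile (fun l => !isHdr l) with
                    | [] => []
                    | h :: t => h :: t.takeWhile (fun l => !isSec l)) := by
  intro xs
  induction xs with
  | nil => intro parts; simp [aLoop]
  | cons x rest ih =>
    intro parts
    by_cases hp : PySem.Str.startswith x "## Header" = true
    · have hh : (!isHdr x) = false := by unfold isHdr; rw [hp]; rfl
      simp only [aLoop, hp, if_true, List.dropWhile_cons, hh, Bool.false_eq_true, if_false]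
      rw [aLoop_true]
      simp
    · have hp' : PySem.Str.startswith x "## Header" = false := by simpa using hp
      have hh : (!isHdr x) = true := by unfold isHdr; rw [hp']; rfl
      simp only [aLoop, hp', Bool.false_eq_true, if_false, List.dropWhile_cons, hh, if_true]
      exact ih parts

-- takeWhile is everything when dropWhile is empty
lemma takeWhile_eq_self_of_dropWhile_nil {α : Type} {q : α → Bool} {t : List α}
    (h : t.dropWhile q = []) : t.takeWhile q = t := by
  have := List.takeWhile_append_dropWhile (p := q) (l := t)
  rw [h, List.append_nil] at this
  exact this

-- ===== VERDICT (by name: the statement is the Claim_ definition above) =====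
theorem extract_header_section_py_spec : Claim_equal_extract_header_section_py := by
  intro context_md _
  unfold Spec_extract_header_section_py
  simp only [extract_header_section_py, extract_header_section_py_alt]
  set lines := PySem.Str.splitlines context_md with hl
  rw [aLoop_false,
    find?_enumerate (fun l => PySem.Str.startswith l "## Header") lines 0]
  simp only [isHdr, isSec]
  cases hd : lines.dropWhile (fun l => !PySem.Str.startswith l "## Header") with
  | nil => rfl
  | cons h t =>
    simp only [List.nil_append]
    set k := (lines.takeWhile (fun l => !PySem.Str.startswith l "## Header")).length with hk
    have hdropk : lines.drop k = h :: t := by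
      rw [hk, drop_takeWhile_length]; exact hd
    have hrest : PySem.List.slice lines (some ((0 : Int) + (k : Int) + 1)) none = t := by
      have h1 : ((0 : Int) + (k : Int) + 1) = ((k + 1 : Nat) : Int) := by push_cast; ring
      rw [h1, PySem.List.slice_from_natCast, ← List.drop_drop, hdropk]
      rfl
    rw [hrest,
      find?_enumerate (fun l => PySem.Str.startswith l "## " && !PySem.Str.startswith l "## Header") t 0]
    cases he : t.dropWhile (fun l => !(PySem.Str.startswith l "## " && !PySem.Str.startswith l "## Header")) with
    | nil =>
      have htw := takeWhile_eq_self_of_dropWhile_nil he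
      simp only [htw]
      have h2 : ((0 : Int) + (k : Int) + 1 + (t.length : Int)) = ((k + 1 + t.length : Nat) : Int) := by
        push_cast; ring
      have h0 : ((0 : Int) + (k : Int)) = ((k : Nat) : Int) := by ring
      rw [h2, h0, PySem.List.slice_natCast, hdropk]
      congr 1
      simp
      omega
    | cons y t' =>
      set m := (t.takeWhile (fun l => !(PySem.Str.startswith l "## " && !PySem.Str.startswith l "## Header"))).length with hm
      have h2 : ((0 : Int) + (k : Int) + 1 + ((0 : Int) + (m : Int))) = ((k + 1 + m : Nat) : Int) := by
        push_cast; ring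
      have h0 : ((0 : Int) + (k : Int)) = ((k : Nat) : Int) := by ring
      rw [h2, h0, PySem.List.slice_natCast, hdropk]
      congr 1
      have h3 : k + 1 + m - k = m + 1 := by omega
      rw [h3]
      simp only [List.take_succ_cons]
      rw [hm, take_takeWhile_length]
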